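-- pv_equiv track=rewrite | github.com/Daarrik/leetcode-practice | type_string.py | type_string
-- ===== SOURCE A (Python) =====
-- def type_string(string: str):
--   alphabet = 'abcdefghijklmnopqrstuvwxyz'
--   time = 0
--   current_letter = 0
--   for letter in string:
--     letter_index = alphabet.index(letter)
--     time += abs(letter_index - current_letter)
--     current_letter = letter_index
--   return time
-- ===== SOURCE B (Python) =====
-- def type_string(string: str):
--   alphabet = 'abcdefghijklmnopqrstuvwxyz'
--   idxs = [alphabet.index(c) for c in string]
--   # Count, for each of the 25 gaps between adjacent alphabet positions,
--   # how many times the typing finger crosses that gap; the total crossing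
--   # count equals the total travel time.
--   total = 0
--   for gap in range(25):
--     prev = 0
--     for i in idxs:
--       if min(prev, i) <= gap < max(prev, i):
--         total += 1
--       prev = i
--   return total
-- ===== Notes on version B (the rewrite author's own statement) =====
-- stated objective: alternative
-- what changed: instead of summing |position difference| along a stateful pass, B counts, for each of the 25 gaps between adjacent alphabet letters, how many times the pass crosses that gap, and returns the total crossing count
import Mathlib
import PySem

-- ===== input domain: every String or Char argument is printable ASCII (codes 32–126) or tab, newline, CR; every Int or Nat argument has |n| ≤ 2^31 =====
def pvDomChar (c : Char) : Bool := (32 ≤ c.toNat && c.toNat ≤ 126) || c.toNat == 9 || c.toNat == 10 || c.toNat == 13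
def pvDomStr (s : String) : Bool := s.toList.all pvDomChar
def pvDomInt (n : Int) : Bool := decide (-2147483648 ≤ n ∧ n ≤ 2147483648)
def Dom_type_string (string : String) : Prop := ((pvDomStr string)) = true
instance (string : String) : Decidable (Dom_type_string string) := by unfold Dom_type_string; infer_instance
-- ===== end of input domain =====

-- B replaces A's sum-of-|position differences| pass with gap-crossing counting: for each of
-- the 25 gaps between adjacent alphabet letters it counts how often the pass crosses that gap
-- (objective: alternative algorithm, same asymptotic cost).

-- ===== PORT A =====
-- alphabet.index(letter) (a linear search; under Pre_ the letter is present)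
def azIndex (letter : Char) : Int :=
  ("abcdefghijklmnopqrstuvwxyz".toList.idxOf letter : Nat)

def type_string (string : String) : Int :=
  (string.toList.foldl
    (fun (s : Int × Int) letter =>
      let letter_index := azIndex letter
      (s.1 + |letter_index - s.2|, letter_index))
    (0, 0)).1

-- ===== PORT B =====
-- inner loop: 'for i in idxs: if min(prev,i) <= gap < max(prev,i): total += 1; prev = i'
def crossGap (gap total0 : Int) (idxs : List Int) : Int :=
  (idxs.foldl
    (fun (s : Int × Int) i =>
      ((if min s.2 i ≤ gap ∧ gap < max s.2 i then s.1 + 1 else s.1), i))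
    (total0, 0)).1

def type_string_alt (string : String) : Int :=
  let idxs := string.toList.map azIndex
  (PySem.List.pyRange 0 25 1).foldl (fun total gap => crossGap gap total idxs) 0

-- ===== PRECONDITION & SPEC =====
-- Pre_ excludes strings containing a character that is not a lowercase alphabet letter: there Python A's alphabet.index raises ValueError.
def Pre_type_string (string : String) : Prop :=
  (string.toList.all (fun c => "abcdefghijklmnopqrstuvwxyz".toList.contains c)) = true
instance (string : String) : Decidable (Pre_type_string string) := by unfold Pre_type_string; infer_instance

def pvWitness_type_string : String := "cab"

def Spec_type_string (string : String) (out : Int) : Prop := out = type_string_alt string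
instance (string : String) (out : Int) : Decidable (Spec_type_string string out) := by unfold Spec_type_string; infer_instance

-- ===== CLAIM (what is proved, stated in full; the proofs are below) =====
def Claim_equal_type_string : Prop := ∀ (string : String), Dom_type_string string → Pre_type_string string → Spec_type_string string (type_string string)

-- ===== LEMMAS AND PROOFS =====

-- A's fold is the sum of |b - a| over consecutive pairs (start 0).
theorem foldA_eq_pairsum (l : List Int) : ∀ (t cur : Int),
    (l.foldl (fun (s : Int × Int) li => (s.1 + |li - s.2|, li)) (t, cur)).1
      = t + (((cur :: l).zip l).map (fun p : Int × Int => |p.2 - p.1|)).sum := by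
  induction l with
  | nil => intro t cur; simp
  | cons a rest ih =>
      intro t cur
      simp only [List.foldl_cons, List.zip_cons_cons, List.map_cons, List.sum_cons, ih]
      ring

-- B's inner fold is the sum of the 0/1 gap-crossing indicator over consecutive pairs.
theorem crossGap_eq_pairsum (gap : Int) (l : List Int) : ∀ (t cur : Int),
    (l.foldl
      (fun (s : Int × Int) i =>
        ((if min s.2 i ≤ gap ∧ gap < max s.2 i then s.1 + 1 else s.1), i))
      (t, cur)).1
      = t + (((cur :: l).zip l).map
          (fun p : Int × Int => if min p.1 p.2 ≤ gap ∧ gap < max p.1 p.2 then (1:Int) else 0)).sum := by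
  induction l with
  | nil => intro t cur; simp
  | cons a rest ih =>
      intro t cur
      simp only [List.foldl_cons, List.zip_cons_cons, List.map_cons, List.sum_cons, ih]
      split_ifs <;> ring

-- pointwise-sum additivity for list sums
theorem sum_map_add {α : Type} (l : List α) (f g : α → Int) :
    (l.map (fun x => f x + g x)).sum = (l.map f).sum + (l.map g).sum := by
  induction l with
  | nil => simp
  | cons a rest ih => simp [ih]; ring

-- exchange the two summations
theorem sum_swap {α β : Type} (L : List α) (P : List β) (f : α → β → Int) :
    (L.map (fun g => (P.map (f g)).sum)).sum
      = (P.map (fun p => (L.map (fun g => f g p)).sum)).sum := by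
  induction L with
  | nil => simp
  | cons a rest ih =>
      simp only [List.map_cons, List.sum_cons, ih, ← sum_map_add]

-- the 0/1 indicator summed over range n counts the clipped interval
theorem count_range (n : Nat) (lo hi : Int) (h0 : 0 ≤ lo) (h1 : lo ≤ hi) :
    (((List.range n).map (fun k : Nat => (k:Int))).map (fun g => if lo ≤ g ∧ g < hi then (1:Int) else 0)).sum
      = min hi n - min lo n := by
  induction n with
  | zero => simp; omega
  | succ m ih =>
      rw [List.range_succ, List.map_append, List.map_append, List.sum_append, ih]
      simp only [List.map_cons, List.map_nil, List.sum_cons, List.sum_nil]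
      split_ifs with h <;> push_cast <;> push_cast at h <;> omega

theorem pyRange25 :
    PySem.List.pyRange 0 25 1 = (List.range 25).map (fun k : Nat => (k : Int)) := by decide

-- azIndex of a letter present in the alphabet lies in [0, 26)
theorem azIndex_bounds {c : Char}
    (h : c ∈ "abcdefghijklmnopqrstuvwxyz".toList) :
    0 ≤ azIndex c ∧ azIndex c < 26 := by
  unfold azIndex
  have := List.idxOf_lt_length_of_mem h
  constructor
  · exact Int.natCast_nonneg _
  · exact_mod_cast this

theorem type_string_spec' (s : String)
    (hpre : Pre_type_string s) : type_string s = type_string_alt s := by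
  unfold type_string type_string_alt
  set idxs := s.toList.map azIndex with hidxs
  -- A side
  rw [← List.foldl_map (f := azIndex)
      (g := fun (st : Int × Int) li => (st.1 + |li - st.2|, li))]
  rw [foldA_eq_pairsum idxs 0 0]
  -- B side: outer fold accumulates crossGap sums
  have houter : ∀ (L : List Int) (t : Int),
      L.foldl (fun total gap => crossGap gap total idxs) t
        = t + (L.map (fun gap =>
            ((((0:Int) :: idxs).zip idxs).map
              (fun p : Int × Int => if min p.1 p.2 ≤ gap ∧ gap < max p.1 p.2 then (1:Int) else 0)).sum)).sum := by
    intro L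
    induction L with
    | nil => intro t; simp
    | cons a rest ih =>
        intro t
        simp only [List.foldl_cons, List.map_cons, List.sum_cons, ih]
        unfold crossGap
        rw [crossGap_eq_pairsum a idxs t 0]
        ring
  rw [houter, pyRange25]
  rw [sum_swap]
  simp only [zero_add]
  -- pointwise: for each consecutive pair, the crossing count equals |b - a|
  apply congrArg
  apply List.map_congr_left
  intro p hp
  -- members of the pair list are bounded
  obtain ⟨hmem1, hmem2⟩ := List.of_mem_zip hp
  have hb : ∀ x ∈ (0:Int) :: idxs, 0 ≤ x ∧ x < 26 := by
    intro x hx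
    rcases List.mem_cons.mp hx with h | h
    · omega
    · rw [hidxs] at h
      rcases List.mem_map.mp h with ⟨c, hc, rfl⟩
      have hc' : c ∈ "abcdefghijklmnopqrstuvwxyz".toList := by
        have := List.all_eq_true.mp hpre c hc
        simpa using this
      exact azIndex_bounds hc'
  have h1 := hb p.1 hmem1
  have h2 := hb p.2 (List.mem_cons_of_mem _ hmem2)
  rw [count_range 25 (min p.1 p.2) (max p.1 p.2) (by omega) (by omega)]
  have habs : |p.2 - p.1| = max p.1 p.2 - min p.1 p.2 := by
    rcases le_total p.1 p.2 with h | h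
    · rw [abs_of_nonneg (by omega), max_eq_right h, min_eq_left h]
    · rw [abs_of_nonpos (by omega), max_eq_left h, min_eq_right h]; ring
  rw [habs]
  omega

-- ===== VERDICT (by name: the statement is the Claim_ definition above) =====
theorem type_string_spec : Claim_equal_type_string := by
  intro s _ hpre
  unfold Spec_type_string
  exact type_string_spec' s hpre
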